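-- pv_equiv track=rewrite | github.com/AbrarAdib103/first-project | test.py | find_min_stops
-- ===== SOURCE A (Python) =====
-- def find_min_stops(D, m, distances):
--     stops = 0  # Initialize the number of stops
--     current_reach = m  # Current reach of the car
--     i = 0  # Index of the current gas station
--     stop_points = []  # To store the gas stations where stops are made
--
--     while current_reach < D:
--         # Find the farthest gas station reachable from the current position
--         farthest_reach = current_reach
--         while i < len(distances) and distances[i] <= current_reach:
--             farthest_reach = max(farthest_reach, distances[i] + m)
--             i += 1
--
--         # If we can't reach the next gas station, it's impossible to complete the journey
--         if farthest_reach == current_reach: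
--             return -1, []
--
--         # Update the current reach and the number of stops
--         current_reach = farthest_reach
--         stops += 1
--         stop_points.append(distances[i - 1])  # The last gas station used to reach farther
--
--     return stops, stop_points
-- ===== SOURCE B (Python) =====
-- def find_min_stops(D, m, distances):
--     # Single forward pass: maintain the running farthest reach and the last
--     # reachable station, refuelling lazily when the next station (or the end)
--     # is out of reach, instead of rescanning with a nested loop.
--     stops = 0
--     reach = m
--     farthest = m
--     last_reachable = None  # never appended: a refuel before any station is processed fails
--     stop_points = []
--     for d in distances:
--         while d > reach and reach < D:
--             if farthest <= reach:
--                 return -1, []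
--             stops += 1
--             stop_points.append(last_reachable)
--             reach = farthest
--         if d + m > farthest:
--             farthest = d + m
--         last_reachable = d
--     while reach < D:
--         if farthest <= reach:
--             return -1, []
--         stops += 1
--         stop_points.append(last_reachable)
--         reach = farthest
--     return stops, stop_points
-- ===== Notes on version B (the rewrite author's own statement) =====
-- stated objective: alternative
-- what changed: Replaces A's outer while-loop that rescans with an index-based inner while over the station array by a single structural pass over the distances that maintains the running farthest reach and the last reachable station, refuelling lazily at each unreachable station and once more after the pass if the destination is still out of reach.
import Mathlib
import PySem

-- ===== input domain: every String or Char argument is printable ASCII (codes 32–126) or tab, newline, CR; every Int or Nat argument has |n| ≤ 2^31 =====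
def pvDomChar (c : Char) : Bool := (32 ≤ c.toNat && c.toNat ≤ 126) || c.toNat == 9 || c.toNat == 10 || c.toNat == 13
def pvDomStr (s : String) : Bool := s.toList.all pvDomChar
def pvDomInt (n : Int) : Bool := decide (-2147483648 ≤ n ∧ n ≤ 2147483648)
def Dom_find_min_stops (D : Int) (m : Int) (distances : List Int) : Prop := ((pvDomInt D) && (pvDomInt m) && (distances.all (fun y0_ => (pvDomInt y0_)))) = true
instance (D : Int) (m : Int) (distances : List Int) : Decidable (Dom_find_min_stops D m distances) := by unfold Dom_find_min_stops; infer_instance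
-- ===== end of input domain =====

-- B replaces A's outer while-loop (which rescans from index i with a nested while on each
-- refuel) by a single structural pass over the distances that maintains the running farthest
-- reach and the last reachable station; same return value, no speed claim.
-- All loops are ported with an explicit fuel counter that provably exceeds the number of
-- iterations (each refuel raises `reach` by at least 1, and scans advance i): the fuel-0
-- fallbacks are never reached, they only make the recursions structural.

-- ===== PORT A =====
-- Python's `distances[i - 1]`; in every state the port reaches it, 1 ≤ i ≤ len(distances),
-- so the index is in range and the `.getD 0` default is unreachable.
def lastUsed (ds : List Int) (i : Nat) : Int := (PySem.List.pyGet? ds ((i : Int) - 1)).getD 0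

-- inner while: `while i < len(distances) and distances[i] <= current_reach`
-- (fuel ds.length suffices: i advances by 1 per iteration and stays ≤ ds.length)
def scanA (m : Int) (ds : List Int) (reach : Int) : Nat → Nat → Int → Int × Nat
  | 0, i, far => (far, i)
  | fuel + 1, i, far =>
    if h : i < ds.length then
      if ds[i] ≤ reach then scanA m ds reach fuel (i + 1) (max far (ds[i] + m))
      else (far, i)
    else (far, i)

-- outer while: `while current_reach < D` (fuel (D - reach).toNat + 1 suffices:
-- reach strictly increases each iteration)
def outerA (D m : Int) (ds : List Int) : Nat → Int → Int → Nat → List Int → Int × List Int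
  | 0, stops, _, _, sp => (stops, sp)
  | fuel + 1, stops, reach, i, sp =>
    if reach < D then
      if (scanA m ds reach ds.length i reach).1 = reach then (-1, [])
      else outerA D m ds fuel (stops + 1) (scanA m ds reach ds.length i reach).1
        (scanA m ds reach ds.length i reach).2
        (sp ++ [lastUsed ds (scanA m ds reach ds.length i reach).2])
    else (stops, sp)

def find_min_stops (D : Int) (m : Int) (distances : List Int) : Int × List Int :=
  outerA D m distances ((D - m).toNat + 1) 0 m 0 []

-- ===== PORT B =====
-- trailing `while reach < D` of B (farthest and last are not modified by that loop)
def bPost (D farthest last : Int) : Nat → Int → Int → List Int → Int × List Int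
  | 0, stops, _, sp => (stops, sp)
  | fuel + 1, stops, reach, sp =>
    if reach < D then
      if farthest ≤ reach then (-1, [])
      else bPost D farthest last fuel (stops + 1) farthest (sp ++ [last])
    else (stops, sp)

-- `for d in distances` with the inner `while d > reach and reach < D`
-- (`last` starts as 0 for Python's None: it is never appended before a station is processed)
def bGo (D m : Int) : Nat → List Int → Int → Int → Int → Int → List Int → Int × List Int
  | 0, _, stops, _, _, _, sp => (stops, sp)
  | _ + 1, [], stops, reach, farthest, last, sp =>
    bPost D farthest last ((D - reach).toNat + 1) stops reach sp
  | fuel + 1, d :: rest, stops, reach, farthest, last, sp =>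
    if reach < d ∧ reach < D then
      if farthest ≤ reach then (-1, [])
      else bGo D m fuel (d :: rest) (stops + 1) farthest farthest last (sp ++ [last])
    else bGo D m fuel rest stops reach (if farthest < d + m then d + m else farthest) d sp

def find_min_stops_alt (D : Int) (m : Int) (distances : List Int) : Int × List Int :=
  bGo D m (distances.length + ((D - m).toNat + 1)) distances 0 m m 0 []

-- ===== PRECONDITION & SPEC =====
def Spec_find_min_stops (D : Int) (m : Int) (distances : List Int) (out : Int × List Int) : Prop := out = find_min_stops_alt D m distances
instance (D : Int) (m : Int) (distances : List Int) (out : Int × List Int) : Decidable (Spec_find_min_stops D m distances out) := by unfold Spec_find_min_stops; infer_instance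

-- ===== CLAIM (what is proved, stated in full; the proofs are below) =====
def Claim_equal_find_min_stops : Prop := ∀ (D : Int) (m : Int) (distances : List Int), Dom_find_min_stops D m distances → Spec_find_min_stops D m distances (find_min_stops D m distances)

-- ===== LEMMAS AND PROOFS =====

-- mid-scan view of A's computation: currently scanning from station i with accumulator
-- far against the reach the scan started from (proof-side helper only)
def aRun (D m : Int) (ds : List Int) (stops reach : Int) (i : Nat) (far : Int) (sp : List Int) :
    Int × List Int :=
  if i < ds.length ∧ ds.getD i 0 ≤ reach then
    aRun D m ds stops reach (i + 1) (max far (ds.getD i 0 + m)) sp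
  else if far ≤ reach then (-1, [])
  else if far < D then aRun D m ds (stops + 1) far i far (sp ++ [lastUsed ds i])
  else (stops + 1, sp ++ [lastUsed ds i])
termination_by ((D - reach).toNat, ds.length - i)
decreasing_by
  · apply Prod.Lex.right; omega
  · apply Prod.Lex.left; omega

-- the scanned farthest reach never drops below its starting accumulator
theorem scan_ge (m : Int) (ds : List Int) (reach : Int) :
    ∀ (fs i : Nat) (far : Int), far ≤ (scanA m ds reach fs i far).1 := by
  intro fs
  induction fs with
  | zero => intro i far; simp [scanA]
  | succ fs ih =>
    intro i far
    by_cases h : i < ds.length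
    · by_cases h2 : ds[i] ≤ reach
      · simp only [scanA, dif_pos h, if_pos h2]
        exact le_trans (le_max_left _ _) (ih _ _)
      · simp [scanA, h, h2]
    · simp [scanA, h]

-- the mid-scan view finishes the current scan exactly as scanA does
theorem aRun_scan (D m : Int) (ds : List Int) (stops reach : Int) (sp : List Int) :
    ∀ (fs i : Nat) (far : Int), ds.length - i ≤ fs →
      aRun D m ds stops reach i far sp =
        (if (scanA m ds reach fs i far).1 ≤ reach then (-1, [])
         else if (scanA m ds reach fs i far).1 < D then
           aRun D m ds (stops + 1) (scanA m ds reach fs i far).1 (scanA m ds reach fs i far).2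
             (scanA m ds reach fs i far).1 (sp ++ [lastUsed ds (scanA m ds reach fs i far).2])
         else (stops + 1, sp ++ [lastUsed ds (scanA m ds reach fs i far).2])) := by
  intro fs
  induction fs with
  | zero =>
    intro i far hfs
    rw [aRun, if_neg (show ¬(i < ds.length ∧ ds.getD i 0 ≤ reach) by omega)]
    simp [scanA]
  | succ fs ih =>
    intro i far hfs
    by_cases h : i < ds.length
    · have hgd : ds.getD i 0 = ds[i] := List.getD_eq_getElem ds 0 h
      by_cases h2 : ds[i] ≤ reach
      · rw [aRun, if_pos (show i < ds.length ∧ ds.getD i 0 ≤ reach from ⟨h, by rw [hgd]; exact h2⟩),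
          hgd]
        simp only [scanA, dif_pos h, if_pos h2]
        exact ih (i + 1) _ (by omega)
      · rw [aRun, if_neg (show ¬(i < ds.length ∧ ds.getD i 0 ≤ reach) from fun hc => h2 (hgd ▸ hc.2))]
        simp [scanA, h, h2]
    · rw [aRun, if_neg (fun hc => h hc.1)]
      simp [scanA, h]

-- A's outer loop equals the mid-scan view started on a fresh scan (given sufficient fuel)
theorem outerA_eq_aRun (D m : Int) (ds : List Int) :
    ∀ (fo : Nat) (stops reach : Int) (i : Nat) (sp : List Int), (D - reach).toNat < fo →
      outerA D m ds fo stops reach i sp =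
        if reach < D then aRun D m ds stops reach i reach sp else (stops, sp) := by
  intro fo
  induction fo with
  | zero => intro stops reach i sp hfo; exact absurd hfo (by omega)
  | succ fo ih =>
    intro stops reach i sp hfo
    simp only [outerA]
    by_cases hD : reach < D
    · rw [if_pos hD, if_pos hD, aRun_scan D m ds stops reach sp ds.length i reach (by omega)]
      have hge := scan_ge m ds reach ds.length i reach
      by_cases he : (scanA m ds reach ds.length i reach).1 = reach
      · rw [if_pos he, if_pos (show (scanA m ds reach ds.length i reach).1 ≤ reach by omega)]
      · rw [if_neg he, if_neg (show ¬ (scanA m ds reach ds.length i reach).1 ≤ reach by omega),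
          ih _ _ _ _ (by omega)]
    · rw [if_neg hD, if_neg hD]

-- once the destination is reached, B's trailing while does nothing
theorem bPost_done (D farthest last : Int) :
    ∀ (fp : Nat) (stops reach : Int) (sp : List Int), ¬ reach < D →
      bPost D farthest last fp stops reach sp = (stops, sp) := by
  intro fp stops reach sp h
  cases fp with
  | zero => rfl
  | succ fp => simp [bPost, h]

-- once the destination is reached, B only sweeps the remaining stations
theorem bGo_done (D m : Int) :
    ∀ (fuel : Nat) (l : List Int) (stops reach farthest last : Int) (sp : List Int),
      ¬ reach < D → bGo D m fuel l stops reach farthest last sp = (stops, sp) := by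
  intro fuel
  induction fuel with
  | zero => intro l stops reach farthest last sp _; rfl
  | succ fuel ih =>
    intro l stops reach farthest last sp h
    cases l with
    | nil => simp only [bGo]; exact bPost_done D farthest last _ stops reach sp h
    | cons d rest =>
      simp only [bGo]
      rw [if_neg (by tauto)]
      exact ih _ _ _ _ _ _ h

-- simulation after the stations are exhausted: A's mid-scan view against B's trailing while
theorem simPost (D m : Int) (ds : List Int) (i : Nat) (far last : Int) :
    ∀ (fp : Nat) (stops reach : Int) (sp : List Int),
      (D - reach).toNat < fp → reach < D → ds.length ≤ i → reach ≤ far →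
      (reach < far → last = lastUsed ds i) →
      aRun D m ds stops reach i far sp = bPost D far last fp stops reach sp := by
  intro fp
  induction fp with
  | zero => intro stops reach sp hfp hD _ _ _; exact absurd hfp (by omega)
  | succ fp ih =>
    intro stops reach sp hfp hD hlen hrf hlast
    rw [aRun, if_neg (show ¬(i < ds.length ∧ ds.getD i 0 ≤ reach) by omega)]
    simp only [bPost]
    rw [if_pos hD]
    by_cases hfr : far ≤ reach
    · rw [if_pos hfr, if_pos hfr]
    · rw [if_neg hfr, if_neg hfr]
      have hl : last = lastUsed ds i := hlast (by omega)
      rw [← hl]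
      by_cases hfD : far < D
      · rw [if_pos hfD,
          ih (stops + 1) far (sp ++ [last]) (by omega) hfD hlen (le_refl far)
            (fun h => absurd h (lt_irrefl far))]
      · rw [if_neg hfD, bPost_done D far last fp (stops + 1) far (sp ++ [last]) (by omega)]

-- main simulation: A's mid-scan view against B's single pass over the remaining stations
theorem sim (D m : Int) (ds : List Int) :
    ∀ (fuel : Nat) (stops reach : Int) (i : Nat) (far last : Int) (sp : List Int),
      (D - reach).toNat + (ds.length - i) < fuel →
      reach < D → reach ≤ far → (reach < far → last = lastUsed ds i) →
      aRun D m ds stops reach i far sp = bGo D m fuel (ds.drop i) stops reach far last sp := by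
  intro fuel
  induction fuel with
  | zero => intro stops reach i far last sp hn hD _ _; exact absurd hn (by omega)
  | succ fuel ih =>
    intro stops reach i far last sp hn hD hrf hlast
    rcases hrest : ds.drop i with _ | ⟨d, rest⟩
    · -- all stations processed: A's scan finds nothing; B is in its trailing while
      have hlen : ds.length ≤ i := List.drop_eq_nil_iff.mp hrest
      simp only [bGo]
      exact simPost D m ds i far last ((D - reach).toNat + 1) stops reach sp (by omega) hD
        hlen hrf hlast
    · -- next station is d
      have hi : i < ds.length := by
        by_contra hc
        rw [List.drop_eq_nil_iff.mpr (by omega)] at hrest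
        simp at hrest
      have hcons := (List.drop_eq_getElem_cons hi).symm.trans hrest
      injection hcons with hd hdrop1
      have hgd : ds.getD i 0 = d := by rw [List.getD_eq_getElem ds 0 hi, hd]
      rw [aRun]
      simp only [bGo]
      by_cases hld : d ≤ reach
      · -- station within reach: both consume it
        rw [if_pos (show i < ds.length ∧ ds.getD i 0 ≤ reach from ⟨hi, by rw [hgd]; exact hld⟩)]
        rw [if_neg (show ¬(reach < d ∧ reach < D) by omega)]
        rw [hgd]
        have hmax : max far (d + m) = if far < d + m then d + m else far := by
          rw [Int.max_def]; split_ifs <;> omega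
        have hlu : lastUsed ds (i + 1) = d := by
          unfold lastUsed
          have hcast : ((i + 1 : Nat) : Int) - 1 = (i : Int) := by push_cast; ring
          rw [hcast, PySem.List.pyGet?_natCast, List.getElem?_eq_getElem hi, hd]
          rfl
        rw [hmax,
          ih stops reach (i + 1) (if far < d + m then d + m else far) d sp (by omega) hD
            (by split_ifs <;> omega) (fun _ => hlu.symm),
          hdrop1]
      · -- station out of reach: refuel (or fail)
        rw [if_neg (show ¬(i < ds.length ∧ ds.getD i 0 ≤ reach) by omega)]
        rw [if_pos (show reach < d ∧ reach < D from ⟨by omega, hD⟩)]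
        by_cases hfr : far ≤ reach
        · rw [if_pos hfr, if_pos hfr]
        · rw [if_neg hfr, if_neg hfr]
          have hl : last = lastUsed ds i := hlast (by omega)
          rw [← hl]
          by_cases hfD : far < D
          · rw [if_pos hfD,
              ih (stops + 1) far i far last (sp ++ [last]) (by omega) hfD (le_refl far)
                (fun h => absurd h (lt_irrefl far)),
              hrest]
          · rw [if_neg hfD,
              bGo_done D m fuel (d :: rest) (stops + 1) far far last (sp ++ [last]) hfD]

-- ===== VERDICT (by name: the statement is the Claim_ definition above) =====
theorem find_min_stops_spec : Claim_equal_find_min_stops := by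
  intro D m ds _
  unfold Spec_find_min_stops find_min_stops find_min_stops_alt
  rw [outerA_eq_aRun D m ds ((D - m).toNat + 1) 0 m 0 [] (by omega)]
  by_cases hD : m < D
  · rw [if_pos hD,
      sim D m ds (ds.length + ((D - m).toNat + 1)) 0 m 0 m 0 [] (by omega) hD (le_refl m)
        (fun h => absurd h (lt_irrefl m)),
      List.drop_zero]
  · rw [if_neg hD, bGo_done D m _ ds 0 m m 0 [] hD]
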